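-- pv_equiv track=rewrite | github.com/OoDBag/VisTA | vista/src/r1-v/src/open_r1/grpo.py | clean_answer_for_number_comparison
-- ===== SOURCE A (Python) =====
-- def clean_answer_for_number_comparison(label, answer):
--     """
--     Clean answer for number comparison when label is purely numeric.
--     Only keeps valid decimal points (must be followed by digits).
--     """
--     if answer is None:
--         return answer
--
--     if str(label).replace(".", "").isdigit():
--         temp_answer = ''.join(char for char in str(answer) if char.isdigit() or char == '.')
--         result = []
--         i = 0
--         while i < len(temp_answer):
--             if temp_answer[i] == '.':
--                 if i == len(temp_answer) - 1 or not temp_answer[i + 1].isdigit():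
--                     i += 1
--                     continue
--             result.append(temp_answer[i])
--             i += 1
--         return ''.join(result).strip()
--     return answer
-- ===== SOURCE B (Python) =====
-- def clean_answer_for_number_comparison(label, answer):
--     """
--     Clean answer for number comparison when label is purely numeric.
--     Only keeps valid decimal points (must be followed by digits).
--     """
--     if answer is None:
--         return answer
--
--     if str(label).replace(".", "").isdigit():
--         out = []
--         pending_dot = False
--         for c in str(answer):
--             if c.isdigit():
--                 if pending_dot:
--                     out.append('.')
--                 out.append(c)
--                 pending_dot = False
--             elif c == '.':
--                 pending_dot = True
--         return ''.join(out).strip()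
--     return answer
-- ===== Notes on version B (the rewrite author's own statement) =====
-- stated objective: simpler
-- what changed: Replaced A's two passes (build a filtered temp string, then an index-based while loop deleting dots not followed by a digit) by one forward pass over the raw answer with a pending-dot flag: a dot is buffered and emitted only when the next kept character turns out to be a digit.
import Mathlib
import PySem

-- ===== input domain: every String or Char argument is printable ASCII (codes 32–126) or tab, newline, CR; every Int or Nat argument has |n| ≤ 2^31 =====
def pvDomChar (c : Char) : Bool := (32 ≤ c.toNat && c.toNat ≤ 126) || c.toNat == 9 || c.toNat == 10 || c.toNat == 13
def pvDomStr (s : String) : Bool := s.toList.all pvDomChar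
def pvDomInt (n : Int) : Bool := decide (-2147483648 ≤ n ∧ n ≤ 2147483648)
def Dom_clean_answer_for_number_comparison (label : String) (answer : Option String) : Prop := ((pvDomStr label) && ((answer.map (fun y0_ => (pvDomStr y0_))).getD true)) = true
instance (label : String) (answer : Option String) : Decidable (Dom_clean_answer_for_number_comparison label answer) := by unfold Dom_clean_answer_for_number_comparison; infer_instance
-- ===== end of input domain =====

-- B replaces A's two passes (filter into a temp string, then an index while-loop pruning dots)
-- with one forward pass carrying a pending-dot flag; same return value, simpler single pass.

-- ===== PORT A =====
-- the while loop of A: index i over temp, skipping a '.' not followed by a digit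
def pvALoop (temp : List Char) (i : Nat) (result : List Char) : List Char :=
  if i < temp.length then
    if temp.getD i ' ' == '.' && (i == temp.length - 1 || !(PySem.Chars.isdigit (temp.getD (i + 1) ' '))) then
      pvALoop temp (i + 1) result
    else
      pvALoop temp (i + 1) (result ++ [temp.getD i ' '])
  else result
termination_by temp.length - i
decreasing_by all_goals omega

def clean_answer_for_number_comparison (label : String) (answer : Option String) : Option String :=
  match answer with
  | none => none
  | some ans =>
    if PySem.Str.strIsdigit (PySem.Str.replace label "." "") then
      let temp := ans.toList.filter (fun c => PySem.Chars.isdigit c || c == '.')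
      some (PySem.Str.strip (String.ofList (pvALoop temp 0 [])))
    else some ans

-- ===== PORT B =====
-- the single forward pass of Source B: pending-dot flag, emit '.' only before a digit
def pvBLoop (cs : List Char) (pending : Bool) (out : List Char) : List Char :=
  match cs with
  | [] => out
  | c :: rest =>
    if PySem.Chars.isdigit c then
      pvBLoop rest false ((if pending then out ++ ['.'] else out) ++ [c])
    else if c == '.' then
      pvBLoop rest true out
    else
      pvBLoop rest pending out

def clean_answer_for_number_comparison_alt (label : String) (answer : Option String) : Option String :=
  match answer with
  | none => none
  | some ans =>
    if PySem.Str.strIsdigit (PySem.Str.replace label "." "") then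
      some (PySem.Str.strip (String.ofList (pvBLoop ans.toList false [])))
    else some ans

-- ===== PRECONDITION & SPEC =====
def Spec_clean_answer_for_number_comparison (label : String) (answer : Option String) (out : Option String) : Prop := out = clean_answer_for_number_comparison_alt label answer
instance (label : String) (answer : Option String) (out : Option String) : Decidable (Spec_clean_answer_for_number_comparison label answer out) := by unfold Spec_clean_answer_for_number_comparison; infer_instance

-- ===== CLAIM (what is proved, stated in full; the proofs are below) =====
def Claim_equal_clean_answer_for_number_comparison : Prop := ∀ (label : String) (answer : Option String), Dom_clean_answer_for_number_comparison label answer → Spec_clean_answer_for_number_comparison label answer (clean_answer_for_number_comparison label answer)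

-- ===== LEMMAS AND PROOFS =====

-- common specification: prune every '.' whose successor is not a digit
def pvProc : List Char → List Char
  | [] => []
  | c :: rest =>
    if c == '.' && !(PySem.Chars.isdigit (rest.headD ' ')) then pvProc rest
    else c :: pvProc rest

theorem pvProc_nil : pvProc [] = [] := rfl

theorem pvProc_cons (c : Char) (rest : List Char) :
    pvProc (c :: rest) =
      if c == '.' && !(PySem.Chars.isdigit (rest.headD ' ')) then pvProc rest
      else c :: pvProc rest := rfl

theorem pv_headD_drop (temp : List Char) (k : Nat) :
    (temp.drop k).headD ' ' = temp.getD k ' ' := by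
  rw [show (temp.drop k).headD ' ' = ((temp.drop k).head?).getD ' ' from by
      cases temp.drop k <;> simp]
  rw [List.head?_drop, List.getD_eq_getElem?_getD]

theorem pvALoop_eq (temp : List Char) (i : Nat) (result : List Char) :
    pvALoop temp i result = result ++ pvProc (temp.drop i) := by
  induction i, result using pvALoop.induct temp with
  | case1 i result h hc ih =>
      rw [pvALoop, if_pos h, if_pos hc, ih]
      have hdrop : temp.drop i = temp[i] :: temp.drop (i + 1) :=
        List.drop_eq_getElem_cons h
      have hc' : temp.getD i ' ' = temp[i] := by
        simp [List.getD_eq_getElem?_getD, h]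
      rw [hdrop, pvProc_cons]
      have hcond : (temp[i] == '.' && !(PySem.Chars.isdigit ((temp.drop (i+1)).headD ' '))) = true := by
        rw [pv_headD_drop, ← hc']
        have hc2 := hc
        simp only [Bool.and_eq_true, Bool.or_eq_true] at hc2
        obtain ⟨h1, h2⟩ := hc2
        have hdig : (!PySem.Chars.isdigit (temp.getD (i + 1) ' ')) = true := by
          rcases h2 with h3 | h3
          · have he : i = temp.length - 1 := by simpa using h3
            have hge : temp.length ≤ i + 1 := by omega
            rw [List.getD_eq_getElem?_getD, List.getElem?_eq_none hge]
            simp [PySem.Chars.isdigit]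
          · exact h3
        simp only [Bool.and_eq_true]
        exact ⟨h1, hdig⟩
      rw [if_pos hcond]
  | case2 i result h hc ih =>
      rw [pvALoop, if_pos h, if_neg hc, ih]
      have hdrop : temp.drop i = temp[i] :: temp.drop (i + 1) :=
        List.drop_eq_getElem_cons h
      have hc' : temp.getD i ' ' = temp[i] := by
        simp [List.getD_eq_getElem?_getD, h]
      have hcf : (temp.getD i ' ' == '.' && (i == temp.length - 1 || !(PySem.Chars.isdigit (temp.getD (i + 1) ' ')))) = false :=
        Bool.not_eq_true _ ▸ Bool.of_not_eq_true hc
      rw [hdrop, pvProc_cons]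
      have hcond : (temp[i] == '.' && !(PySem.Chars.isdigit ((temp.drop (i+1)).headD ' '))) = false := by
        rw [pv_headD_drop, ← hc']
        cases h1 : (temp.getD i ' ' == '.') with
        | false => simp
        | true =>
            simp only [Bool.true_and]
            have h2 := hcf
            rw [h1, Bool.true_and] at h2
            rcases Bool.or_eq_false_iff.mp h2 with ⟨h3, h4⟩
            simpa using h4
      rw [if_neg (by rw [hcond]; simp), ← hc']
      simp
  | case3 i result h =>
      rw [pvALoop, if_neg h]
      have hnil : temp.drop i = [] := List.drop_eq_nil_of_le (by omega)
      rw [hnil, pvProc_nil]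
      simp

theorem pvBLoop_eq (cs : List Char) (pending : Bool) (out : List Char) :
    pvBLoop cs pending out =
      out ++ pvProc ((if pending then ['.'] else []) ++
        cs.filter (fun c => PySem.Chars.isdigit c || c == '.')) := by
  induction cs generalizing pending out with
  | nil =>
      cases pending <;> simp [pvBLoop, pvProc, PySem.Chars.isdigit]
  | cons c rest ih =>
      rw [pvBLoop]
      cases hd : PySem.Chars.isdigit c with
      | true =>
          simp only [if_true]
          rw [ih]
          have hne : (c == '.') = false := by
            have : c ≠ '.' := by
              intro he; rw [he] at hd; simp [PySem.Chars.isdigit] at hd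
            simp [this]
          have hfilter : (c :: rest).filter (fun c => PySem.Chars.isdigit c || c == '.') =
              c :: rest.filter (fun c => PySem.Chars.isdigit c || c == '.') := by
            simp [hd]
          rw [hfilter]
          cases pending with
          | true => simp [pvProc_cons, hd, hne]
          | false => simp [pvProc_cons, hne]
      | false =>
          simp only [Bool.false_eq_true, if_false]
          cases hdot : (c == '.') with
          | true =>
              simp only [if_true]
              rw [ih]
              have hc : c = '.' := eq_of_beq hdot
              have hfilter : (c :: rest).filter (fun c => PySem.Chars.isdigit c || c == '.') =
                  c :: rest.filter (fun c => PySem.Chars.isdigit c || c == '.') := by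
                simp [hdot]
              rw [hfilter, hc]
              cases pending with
              | true => simp [pvProc_cons, PySem.Chars.isdigit]
              | false => simp
          | false =>
              simp only [Bool.false_eq_true, if_false]
              rw [ih]
              have hfilter : (c :: rest).filter (fun c => PySem.Chars.isdigit c || c == '.') =
                  rest.filter (fun c => PySem.Chars.isdigit c || c == '.') := by
                simp [hd, hdot]
              rw [hfilter]

-- ===== VERDICT (by name: the statement is the Claim_ definition above) =====
theorem clean_answer_for_number_comparison_spec : Claim_equal_clean_answer_for_number_comparison := by
  intro label answer _
  unfold Spec_clean_answer_for_number_comparison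
  unfold clean_answer_for_number_comparison clean_answer_for_number_comparison_alt
  cases answer with
  | none => rfl
  | some ans =>
      simp only
      cases h : PySem.Str.strIsdigit (PySem.Str.replace label "." "") with
      | false => simp
      | true =>
          simp only [if_true]
          rw [pvALoop_eq, pvBLoop_eq]
          simp
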